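-- pv_equiv track=rewrite | github.com/qmcs/qmcs.github.io | static/notebooks/cooccurrence.py | cooccurrence
-- ===== SOURCE A (Python) =====
-- from collections import deque
-- from itertools import islice, chain
--
-- def cooccurrence(words, window_size=5):
--     """Yield co-occurence pairs in an iterable of words."""
--     words = iter(words)
--
--     before = deque([], maxlen=window_size)
--     after = deque(islice(words, window_size))
--
--     while after:
--         try:
--             word = next(words)
--         except StopIteration:
--             '''There are no more words.'''
--         else:
--             after.append(word)
--
--         target = after.popleft()
--
--         for context in chain(before, after):
--             yield target, context
--
--         before.append(target)
-- ===== SOURCE B (Python) =====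
-- def cooccurrence(words, window_size=5):
--     """Yield co-occurence pairs in an iterable of words."""
--     w = list(words)
--     for i, target in enumerate(w):
--         for context in w[max(0, i - window_size):i]:
--             yield target, context
--         for context in w[i + 1:i + window_size + 1]:
--             yield target, context
-- ===== Notes on version B (the rewrite author's own statement) =====
-- stated objective: simpler
-- what changed: Replaces the incremental deque/islice sliding-window state machine with a stateless pass: materialize the words into a list and, for each index, emit pairs from the preceding and following window obtained by plain slicing.
import Mathlib
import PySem

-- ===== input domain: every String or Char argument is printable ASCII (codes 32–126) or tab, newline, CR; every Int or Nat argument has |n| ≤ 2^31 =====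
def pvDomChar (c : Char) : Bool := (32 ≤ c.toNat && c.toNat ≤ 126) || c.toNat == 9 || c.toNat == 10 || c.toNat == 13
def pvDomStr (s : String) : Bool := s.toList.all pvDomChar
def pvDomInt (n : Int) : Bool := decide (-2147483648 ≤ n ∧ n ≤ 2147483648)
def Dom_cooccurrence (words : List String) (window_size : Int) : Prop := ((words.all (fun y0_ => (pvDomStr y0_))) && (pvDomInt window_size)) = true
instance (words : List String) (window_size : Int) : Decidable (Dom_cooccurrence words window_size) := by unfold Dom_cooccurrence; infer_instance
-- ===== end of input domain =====

-- B replaces A's incremental deque/islice state machine by a stateless pass over the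
-- indexed list, slicing the before/after window at each position (objective: simpler).
-- A is a generator; the equivalence is about the fully-consumed sequence of pairs.

-- ===== PORT A =====
-- deque.append with maxlen = window_size: drops the leftmost element when full
def pvDeqAppend (maxlen : Int) (d : List String) (x : String) : List String :=
  let d' := d ++ [x]
  if (d'.length : Int) > maxlen then d'.drop 1 else d'

-- the 'while after:' loop of A; state = (remaining input words, before, after)
def cooccLoop (window_size : Int) :
    List String → List String → List String → List (String × String)
  | _, _, [] => []
  | [], before, t :: rest =>
      -- next(words) raised StopIteration: after unchanged, then target = popleft
      ((before ++ rest).map (fun c => (t, c))) ++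
        cooccLoop window_size [] (pvDeqAppend window_size before t) rest
  | w :: remaining, before, t :: rest =>
      -- word appended to after, then target = popleft
      ((before ++ (rest ++ [w])).map (fun c => (t, c))) ++
        cooccLoop window_size remaining (pvDeqAppend window_size before t) (rest ++ [w])
termination_by remaining _ after => remaining.length + after.length

def cooccurrence (words : List String) (window_size : Int) : List (String × String) :=
  -- islice(words, window_size): the first window_size elements (window_size ≥ 0 by Pre_)
  cooccLoop window_size (words.drop window_size.toNat) [] (words.take window_size.toNat)

-- ===== PORT B =====
def cooccurrence_alt (words : List String) (window_size : Int) : List (String × String) :=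
  (PySem.List.enumerate words).flatMap (fun p =>
    ((PySem.List.slice words (some (max 0 (p.1 - window_size))) (some p.1)).map
        (fun c => (p.2, c))) ++
    ((PySem.List.slice words (some (p.1 + 1)) (some (p.1 + window_size + 1))).map
        (fun c => (p.2, c))))

-- ===== PRECONDITION & SPEC =====
-- A raises ValueError for a negative window_size (deque maxlen / islice); Pre_ excludes exactly those inputs.
def Pre_cooccurrence (words : List String) (window_size : Int) : Prop := 0 ≤ window_size
instance (words : List String) (window_size : Int) : Decidable (Pre_cooccurrence words window_size) := by unfold Pre_cooccurrence; infer_instance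
def pvWitness_cooccurrence : List String × Int := (["a", "b", "c"], 2)

def Spec_cooccurrence (words : List String) (window_size : Int) (out : List (String × String)) : Prop := out = cooccurrence_alt words window_size
instance (words : List String) (window_size : Int) (out : List (String × String)) : Decidable (Spec_cooccurrence words window_size out) := by unfold Spec_cooccurrence; infer_instance

-- ===== CLAIM (what is proved, stated in full; the proofs are below) =====
def Claim_equal_cooccurrence : Prop := ∀ (words : List String) (window_size : Int), Dom_cooccurrence words window_size → Pre_cooccurrence words window_size → Spec_cooccurrence words window_size (cooccurrence words window_size)

-- ===== LEMMAS AND PROOFS =====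

-- window_size = 0: B emits nothing (both slices are empty at every index)
theorem coocc_alt_zero (words : List String) : cooccurrence_alt words 0 = [] := by
  unfold cooccurrence_alt
  apply List.flatMap_eq_nil_iff.mpr
  intro p hp
  obtain ⟨k, hk, rfl⟩ := (PySem.List.mem_enumerate_iff _ _ _).mp hp
  have h1 : ((0:Int) + (k:Int)) = ((k:Nat):Int) := by push_cast; ring
  simp only [h1]
  have a1 : max 0 ((k:Int) - 0) = ((k:Nat):Int) := by push_cast; omega
  have a3 : ((k:Int) + 1) = (((k+1:Nat)):Int) := by push_cast; ring_nf
  have a2 : ((k:Int) + 0 + 1) = (((k+1:Nat)):Int) + ((0:Nat):Int) := by push_cast; ring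
  rw [a1, PySem.List.slice_natCast, a2, a3, PySem.List.slice_natCast_add]
  simp

-- deque step: appending the target to 'before' keeps exactly the last (m+1) processed words
theorem pvDeqAppend_window (words : List String) (i m : Nat) (hlt : i < words.length) :
    pvDeqAppend ((m+1 : Nat) : Int) ((words.take i).drop (i - (m+1))) (words[i]'hlt)
      = (words.take (i+1)).drop (i + 1 - (m+1)) := by
  have htake : words.take (i+1) = words.take i ++ [words[i]'hlt] := by
    rw [List.take_add_one]; simp [List.getElem?_eq_getElem hlt]
  have hlen : ((words.take i).drop (i - (m+1))).length = i - (i - (m+1)) := by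
    simp [List.length_drop, List.length_take]; omega
  unfold pvDeqAppend
  by_cases hc : m + 1 ≤ i
  · rw [if_pos (by simp [hlen]; omega)]
    rw [htake, ← List.drop_append_of_le_length (by simp; omega)]
    rw [List.drop_drop]
    congr 1
    omega
  · rw [if_neg (by simp [hlen]; omega)]
    have e0 : i - (m+1) = 0 := by omega
    have e1 : i + 1 - (m+1) = 0 := by omega
    rw [e0, e1, List.drop_zero, List.drop_zero, htake]

theorem enumerate_drop_cons (words : List String) (i : Nat) (hlt : i < words.length) :
    (PySem.List.enumerate words).drop i
      = ((i:Int), words[i]'hlt) :: (PySem.List.enumerate words).drop (i+1) := by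
  have hl : i < (PySem.List.enumerate words).length := by
    simp [PySem.List.length_enumerate]; omega
  rw [List.drop_eq_getElem_cons hl]
  congr 1
  rw [PySem.List.getElem_enumerate]
  simp

theorem slice_before_eq (words : List String) (i m : Nat) :
    PySem.List.slice words (some (max 0 ((i:Int) - ((m+1:Nat):Int)))) (some (i:Int))
      = (words.take i).drop (i - (m+1)) := by
  have h : max 0 ((i:Int) - ((m+1:Nat):Int)) = ((i - (m+1) : Nat) : Int) := by push_cast; omega
  rw [h, PySem.List.slice_natCast, List.drop_take]

theorem slice_after_eq (words : List String) (i m : Nat) :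
    PySem.List.slice words (some ((i:Int) + 1)) (some ((i:Int) + ((m+1:Nat):Int) + 1))
      = (words.drop (i+1)).take (m+1) := by
  have h1 : ((i:Int) + 1) = (((i+1 : Nat)):Int) := by push_cast; ring
  have h2 : ((i:Int) + ((m+1:Nat):Int) + 1) = (((i+1:Nat)):Int) + (((m+1:Nat)):Int) := by
    push_cast; ring
  rw [h1, h2, PySem.List.slice_natCast_add]

-- loop invariant: at target index i, A's state is (drop (i+w), last w processed, next w words)
theorem coocc_loop_invariant (words : List String) (m : Nat) :
    ∀ k i, words.length = i + k →
    cooccLoop ((m+1 : Nat) : Int) (words.drop (i + (m+1))) ((words.take i).drop (i - (m+1)))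
        ((words.drop i).take (m+1))
    = ((PySem.List.enumerate words).drop i).flatMap (fun p =>
        ((PySem.List.slice words (some (max 0 (p.1 - ((m+1:Nat):Int)))) (some p.1)).map
            (fun c => (p.2, c))) ++
        ((PySem.List.slice words (some (p.1 + 1)) (some (p.1 + ((m+1:Nat):Int) + 1))).map
            (fun c => (p.2, c)))) := by
  intro k
  induction k with
  | zero =>
    intro i hi
    have h1 : words.drop i = [] := List.drop_eq_nil_of_le (by omega)
    have h2 : (PySem.List.enumerate words).drop i = [] :=
      List.drop_eq_nil_of_le (by simp [PySem.List.length_enumerate]; omega)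
    rw [h1, h2]
    simp [cooccLoop]
  | succ k ih =>
    intro i hi
    have hlt : i < words.length := by omega
    have hdropi : words.drop i = words[i]'hlt :: words.drop (i+1) :=
      List.drop_eq_getElem_cons hlt
    have hafter : (words.drop i).take (m+1) = words[i]'hlt :: (words.drop (i+1)).take m := by
      rw [hdropi, List.take_succ_cons]
    have hrec := ih (i+1) (by omega)
    have hbefore := pvDeqAppend_window words i m hlt
    -- the two emitted context windows, as slices of the full list
    have hsb := slice_before_eq words i m
    have hsa := slice_after_eq words i m
    rw [enumerate_drop_cons words i hlt, List.flatMap_cons]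
    rw [hafter]
    rcases hrem : words.drop (i + (m+1)) with _ | ⟨w, rem⟩
    · -- input exhausted: 'after' just shrinks
      have hrest : (words.drop (i+1)).take m = (words.drop (i+1)).take (m+1) := by
        have hle : (words.drop (i+1)).length ≤ m := by
          have := congrArg List.length hrem
          simp [List.length_drop] at this ⊢
          omega
        rw [List.take_of_length_le hle, List.take_of_length_le (by omega)]
      have hrem' : ([] : List String) = words.drop ((i+1) + (m+1)) := by
        rw [List.drop_eq_nil_of_le]
        have := congrArg List.length hrem
        simp [List.length_drop] at this ⊢
        omega
      rw [cooccLoop]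
      rw [hbefore, hrest, hrem', hrec, hsb, hsa]
      simp [List.map_append]
    · -- one more word w = words[i+m+1] enters 'after'
      have hw : words[(i+1)+m]? = some w := by
        have : (words.drop ((i+1)+m)).head? = some w := by
          rw [show (i+1)+m = i + (m+1) by omega, hrem]; rfl
        rwa [List.head?_drop] at this
      have hext : (words.drop (i+1)).take m ++ [w] = (words.drop (i+1)).take (m+1) := by
        rw [List.take_add_one, List.getElem?_drop, hw]; rfl
      have hrem2 : rem = words.drop ((i+1) + (m+1)) := by
        have : (words.drop (i + (m+1))).tail = words.drop ((i + (m+1)) + 1) := List.tail_drop ..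
        rw [hrem] at this
        rw [show (i+1) + (m+1) = (i + (m+1)) + 1 by omega, ← this]
        rfl
      rw [cooccLoop]
      rw [hbefore, hext, hrem2, hrec, hsb, hsa]
      simp [List.map_append]

-- ===== VERDICT (by name: the statement is the Claim_ definition above) =====
theorem cooccurrence_spec : Claim_equal_cooccurrence := by
  intro words window_size _hdom hpre
  unfold Spec_cooccurrence cooccurrence
  have hws : window_size = (window_size.toNat : Int) := (Int.toNat_of_nonneg hpre).symm
  rcases hmn : window_size.toNat with _ | m
  · -- window_size = 0: 'after' starts empty, the loop never runs; B emits nothing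
    rw [hws, hmn]
    simp only [Nat.cast_zero, Int.toNat_zero, List.take_zero]
    rw [cooccLoop, coocc_alt_zero]
  · rw [hws, hmn]
    have := coocc_loop_invariant words m words.length 0 (by omega)
    simp only [Nat.zero_sub, List.drop_zero, Nat.zero_add, List.take_zero, List.drop_nil] at this
    rw [this]
    rfl
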